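-- pv_equiv track=rewrite | github.com/OverKrice3000/EFPythonTasks | englishBeggars/main.py | beggars
-- ===== SOURCE A (Python) =====
-- def beggars(values, n):
--     if n == 0:
--         return []
--     earn = []
--     for i in range(0, n):
--         earn.append(0)
--     for i in range(0, len(values)):
--         earn[i % n] += values[i]
--     return earn
-- ===== SOURCE B (Python) =====
-- def beggars(values, n):
--     # per-bucket strided gather (comprehension) instead of A's scatter pass with a mutable accumulator
--     return [sum(values[i] for i in range(j, len(values), n)) for j in range(n)]
-- ===== Notes on version B (the rewrite author's own statement) =====
-- stated objective: idiomatic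
-- what changed: A's single scatter pass that mutates a pre-filled accumulator at index i % n is replaced by a per-bucket gather: a comprehension that sums the strided index range(j, len(values), n) for each bucket j.
import Mathlib
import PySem

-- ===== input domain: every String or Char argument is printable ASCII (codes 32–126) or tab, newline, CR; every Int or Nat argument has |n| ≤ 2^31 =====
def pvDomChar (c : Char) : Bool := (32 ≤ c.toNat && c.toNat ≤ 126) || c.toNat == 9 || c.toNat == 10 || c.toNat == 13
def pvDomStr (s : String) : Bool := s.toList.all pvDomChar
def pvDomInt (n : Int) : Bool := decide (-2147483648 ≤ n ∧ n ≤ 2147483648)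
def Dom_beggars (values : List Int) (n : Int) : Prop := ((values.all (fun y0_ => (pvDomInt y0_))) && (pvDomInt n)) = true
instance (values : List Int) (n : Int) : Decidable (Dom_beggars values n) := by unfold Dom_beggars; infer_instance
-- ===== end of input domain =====

-- B replaces A's scatter pass (mutable accumulator, index i % n) by a per-bucket
-- strided gather comprehension; same cost, no in-place mutation (idiomatic).

-- ===== PORT A =====
def beggars (values : List Int) (n : Int) : List Int :=
  if n = 0 then []
  else
    -- earn = []; for i in range(0, n): earn.append(0)
    let earn := (PySem.List.pyRange 0 n 1).foldl (fun e _ => e ++ [(0 : Int)]) []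
    -- for i in range(0, len(values)): earn[i % n] += values[i]
    -- under Pre_ the index i % n is in range (n > 0 ⇒ 0 ≤ i % n < n = len earn)
    -- and i is in range of values, so the defaulted reads are exact
    (PySem.List.pyRange 0 (values.length : Int) 1).foldl
      (fun e i =>
        let k := PySem.Int.mod i n
        e.set k.toNat (PySem.List.pyGetD e k 0 + PySem.List.pyGetD values i 0)) earn

-- ===== PORT B =====
def beggars_alt (values : List Int) (n : Int) : List Int :=
  (PySem.List.pyRange 0 n 1).map (fun j =>
    ((PySem.List.pyRange j (values.length : Int) n).map
      (fun i => PySem.List.pyGetD values i 0)).sum)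

-- ===== PRECONDITION & SPEC =====
-- Pre_ excludes n < 0 with non-empty values: there A raises IndexError
-- (it indexes into the empty accumulator list).
def Pre_beggars (values : List Int) (n : Int) : Prop := 0 ≤ n ∨ values = []
instance (values : List Int) (n : Int) : Decidable (Pre_beggars values n) := by
  unfold Pre_beggars; infer_instance
def pvWitness_beggars : List Int × Int := ([3, 1, -2, 7, 4], 3)

def Spec_beggars (values : List Int) (n : Int) (out : List Int) : Prop := out = beggars_alt values n
instance (values : List Int) (n : Int) (out : List Int) : Decidable (Spec_beggars values n out) := by unfold Spec_beggars; infer_instance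

-- ===== CLAIM (what is proved, stated in full; the proofs are below) =====
def Claim_equal_beggars : Prop := ∀ (values : List Int) (n : Int), Dom_beggars values n → Pre_beggars values n → Spec_beggars values n (beggars values n)

-- ===== LEMMAS AND PROOFS =====

-- the sum A accumulates into bucket j after processing the first k values
def bsum (vs : List Int) (m j k : Nat) : Int :=
  (((List.range k).filter (fun i => i % m = j)).map (fun i => vs.getD i 0)).sum

theorem bsum_zero (vs : List Int) (m j : Nat) : bsum vs m j 0 = 0 := by
  simp [bsum]

theorem bsum_succ (vs : List Int) (m j k : Nat) :
    bsum vs m j (k + 1) = bsum vs m j k + (if k % m = j then vs.getD k 0 else 0) := by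
  unfold bsum
  rw [List.range_succ, List.filter_append, List.map_append, List.sum_append]
  by_cases h : k % m = j <;> simp [h]

-- the first loop of A builds the zero accumulator
theorem earn_replicate (m : Nat) :
    (PySem.List.pyRange 0 (m : Int) 1).foldl (fun e _ => e ++ [(0 : Int)]) [] =
      List.replicate m 0 := by
  rw [PySem.List.pyRange_zero_natCast,
      PySem.List.foldl_append_singleton_eq_map (fun _ => (0 : Int))]
  simp [List.eq_replicate_iff]

-- invariant of A's scatter loop
theorem scatter_loop (vs : List Int) (m : Nat) (hm : 0 < m) (k : Nat) :
    ∀ e : List Int, e.length = m →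
      (PySem.List.pyRange 0 (k : Int) 1).foldl
        (fun e i =>
          let k := PySem.Int.mod i (m : Int)
          e.set k.toNat (PySem.List.pyGetD e k 0 + PySem.List.pyGetD vs i 0)) e =
        (List.range m).map (fun j => e.getD j 0 + bsum vs m j k) := by
  induction k with
  | zero =>
    intro e he
    have : PySem.List.pyRange 0 ((0 : Nat) : Int) 1 = [] := by
      rw [PySem.List.pyRange_zero_natCast]; simp
    rw [this]
    simp only [List.foldl_nil, bsum_zero, add_zero]
    apply List.ext_getElem
    · simp [he]
    · intro i h1 h2
      simp only [List.getElem_map, List.getElem_range]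
      rw [List.getD_eq_getElem _ _ (by omega)]
  | succ k ih =>
    intro e he
    have hstep : PySem.List.pyRange 0 ((k + 1 : Nat) : Int) 1 =
        PySem.List.pyRange 0 (k : Int) 1 ++ [(k : Int)] := by
      push_cast
      exact PySem.List.pyRange_one_succ_right (by positivity)
    rw [hstep, List.foldl_append, ih e he]
    simp only [List.foldl_cons, List.foldl_nil]
    have hmod : PySem.Int.mod (k : Int) (m : Int) = ((k % m : Nat) : Int) :=
      PySem.Int.mod_natCast k m
    rw [hmod]
    have hklt : k % m < m := Nat.mod_lt _ hm
    rw [PySem.List.pyGetD_natCast, PySem.List.pyGetD_natCast, Int.toNat_natCast]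
    apply List.ext_getElem
    · simp
    · intro j h1 h2
      simp only [List.length_map, List.length_range] at h1 h2
      rw [List.getElem_set]
      simp only [List.getElem_map, List.getElem_range, bsum_succ]
      by_cases hj : k % m = j
      · subst hj
        rw [List.getD_eq_getElem _ _ (by simp [hklt])]
        simp only [List.getElem_map, List.getElem_range]
        split_ifs with h
        · ring
        · exact absurd trivial h
      · rw [if_neg (by omega), if_neg (by omega), add_zero]

-- the strided Int range is exactly the filtered Nat range, cast
theorem pyRange_stride_eq_filter (L m j : Nat) (hm : 0 < m) (hj : j < m) :
    PySem.List.pyRange (j : Int) (L : Int) (m : Int) =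
      ((List.range L).filter (fun i => i % m = j)).map (fun i : Nat => (i : Int)) := by
  have hm' : (0 : Int) < (m : Int) := by exact_mod_cast hm
  have hnd1 : (PySem.List.pyRange (j : Int) (L : Int) (m : Int)).Nodup := by
    rw [PySem.List.pyRange_of_pos _ _ hm']
    refine List.Nodup.map ?_ List.nodup_range
    intro a b hab
    beta_reduce at hab
    have : (m : Int) * a = (m : Int) * b := by omega
    exact_mod_cast mul_left_cancel₀ hm'.ne' this
  have hnd2 :
      (((List.range L).filter (fun i => i % m = j)).map (fun i : Nat => (i : Int))).Nodup :=
    List.Nodup.map (fun a b h => by exact_mod_cast h) (List.nodup_range.filter _)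
  refine List.Perm.eq_of_pairwise (le := (· < ·))
    (fun a b _ _ h1 h2 => absurd h2 (lt_asymm h1)) ?_ ?_ ?_
  · rw [PySem.List.pyRange_of_pos _ _ hm']
    refine List.pairwise_map.mpr (List.Pairwise.imp_of_mem ?_ List.pairwise_lt_range)
    intro a b _ _ hab
    have : (a : Int) < (b : Int) := by exact_mod_cast hab
    nlinarith
  · refine List.pairwise_map.mpr
      (List.Pairwise.imp_of_mem ?_ (List.pairwise_lt_range.filter _))
    intro a b _ _ hab
    exact_mod_cast hab
  · rw [List.perm_ext_iff_of_nodup hnd1 hnd2]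
    intro x
    rw [PySem.List.mem_pyRange_iff_of_pos hm']
    simp only [List.mem_map, List.mem_filter, List.mem_range, decide_eq_true_eq]
    constructor
    · rintro ⟨h1, h2, d, hd⟩
      have hdnn : 0 ≤ d := by nlinarith
      have hdt : (d.toNat : Int) = d := Int.toNat_of_nonneg hdnn
      have hcast : ((j + m * d.toNat : Nat) : Int) = x := by push_cast [hdt]; linarith
      refine ⟨j + m * d.toNat, ⟨?_, ?_⟩, hcast⟩
      · have h2' := h2; rw [← hcast] at h2'; exact_mod_cast h2'
      · rw [Nat.add_mul_mod_self_left]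
        exact Nat.mod_eq_of_lt hj
    · rintro ⟨i, ⟨hiL, hij⟩, rfl⟩
      refine ⟨?_, by exact_mod_cast hiL, ?_⟩
      · have hji : j ≤ i := hij ▸ Nat.mod_le i m
        exact_mod_cast hji
      · obtain ⟨q, hq⟩ : ∃ q, i = j + m * q :=
          ⟨i / m, by have h := Nat.div_add_mod i m; omega⟩
        exact ⟨(q : Int), by push_cast [hq]; ring⟩

-- B's bucket entry equals bsum
theorem alt_entry (vs : List Int) (m j : Nat) (hm : 0 < m) (hj : j < m) :
    ((PySem.List.pyRange (j : Int) (vs.length : Int) (m : Int)).map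
      (fun i => PySem.List.pyGetD vs i 0)).sum = bsum vs m j vs.length := by
  rw [pyRange_stride_eq_filter _ _ _ hm hj, bsum, List.map_map]
  exact congrArg List.sum (List.map_congr_left fun i _ => by simp)

theorem beggars_eq_of_pos (vs : List Int) (m : Nat) (hm : 0 < m) :
    beggars vs (m : Int) = beggars_alt vs (m : Int) := by
  unfold beggars beggars_alt
  rw [if_neg (by exact_mod_cast hm.ne')]
  rw [earn_replicate, scatter_loop vs m hm vs.length (List.replicate m 0) (by simp)]
  rw [PySem.List.pyRange_zero_natCast, List.map_map]
  apply List.map_congr_left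
  intro j hj
  rw [List.mem_range] at hj
  simp only [Function.comp]
  rw [alt_entry vs m j hm hj, List.getD_eq_getElem _ _ (by simp [hj]),
      List.getElem_replicate, zero_add]

theorem beggars_eq_nonpos (vs : List Int) (n : Int) (hn : n ≤ 0) (h : n = 0 ∨ vs = []) :
    beggars vs n = beggars_alt vs n := by
  rcases h with rfl | rfl
  · simp [beggars, beggars_alt, PySem.List.pyRange_of_pos 0 0 (s := 1) one_pos]
  · rcases eq_or_lt_of_le hn with rfl | hlt
    · simp [beggars, beggars_alt, PySem.List.pyRange_of_pos 0 0 (s := 1) one_pos]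
    · have hemp : PySem.List.pyRange 0 n 1 = [] := by
        rw [PySem.List.pyRange_of_pos 0 n one_pos, if_neg (by omega)]
        simp
      unfold beggars beggars_alt
      rw [if_neg (by omega), hemp]
      simp

-- ===== VERDICT (by name: the statement is the Claim_ definition above) =====
theorem beggars_spec : Claim_equal_beggars := by
  intro values n _ hpre
  unfold Spec_beggars
  rcases lt_trichotomy n 0 with hlt | rfl | hpos
  · rcases hpre with h | h
    · omega
    · exact beggars_eq_nonpos values n hlt.le (Or.inr h)
  · exact beggars_eq_nonpos values 0 le_rfl (Or.inl rfl)
  · have : n = ((n.toNat : Nat) : Int) := by omega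
    rw [this]
    exact beggars_eq_of_pos values n.toNat (by omega)
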